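-- pv_equiv track=rewrite | github.com/ErikKleinsteuber/experience-showcase | basics_python/UE_03/wlParser.py | decideIfSetOrDic
-- ===== SOURCE A (Python) =====
-- def decideIfSetOrDic(string):
--     inStrOne = False
--     inStrTwo = False
--     for c in string:
--
--         if inStrOne is False and inStrTwo is False:
--             if c == "'":
--                 inStrOne = True
--             elif c == '"':
--                 inStrTwo = True
--             elif c == ":":
--                 return "dic"
--         elif inStrOne is True and c == "'":
--             inStrOne = False
--         elif inStrTwo is True and c == '"':
--             inStrTwo = False
--
--     return "set"
-- ===== SOURCE B (Python) =====
-- def decideIfSetOrDic(string):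
--     i = 0
--     n = len(string)
--     while i < n:
--         c = string[i]
--         if c == "'" or c == '"':
--             j = string.find(c, i + 1)
--             if j == -1:
--                 return "set"
--             i = j + 1
--         elif c == ":":
--             return "dic"
--         else:
--             i += 1
--     return "set"
-- ===== Notes on version B (the rewrite author's own statement) =====
-- stated objective: idiomatic
-- what changed: Replaces the per-character two-boolean-flag state machine with an index cursor that skips each quoted region in one step via str.find on the matching quote (returning 'set' on an unterminated quote).
import Mathlib
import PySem

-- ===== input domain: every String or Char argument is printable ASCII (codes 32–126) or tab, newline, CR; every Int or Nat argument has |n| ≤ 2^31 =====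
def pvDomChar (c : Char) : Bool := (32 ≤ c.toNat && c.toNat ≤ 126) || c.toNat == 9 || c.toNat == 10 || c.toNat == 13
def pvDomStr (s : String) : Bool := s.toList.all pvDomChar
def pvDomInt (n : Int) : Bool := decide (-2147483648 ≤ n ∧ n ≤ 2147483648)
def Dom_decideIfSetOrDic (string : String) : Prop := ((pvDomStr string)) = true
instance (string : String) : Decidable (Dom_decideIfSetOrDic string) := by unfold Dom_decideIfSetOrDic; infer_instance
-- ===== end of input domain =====

-- B replaces A's per-character two-boolean-flag scan by an index cursor that skips each
-- quoted region in one step via find-the-matching-quote (idiomatic; same O(n) cost).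


-- ===== PORT A =====
-- literal transliteration of A's for-loop over the two boolean flags
def pvAGo : List Char → Bool → Bool → String
  | [], _, _ => "set"
  | c :: rest, inStrOne, inStrTwo =>
    if inStrOne = false ∧ inStrTwo = false then
      if c = '\'' then pvAGo rest true inStrTwo
      else if c = '"' then pvAGo rest inStrOne true
      else if c = ':' then "dic"
      else pvAGo rest inStrOne inStrTwo
    else if inStrOne = true ∧ c = '\'' then pvAGo rest false inStrTwo
    else if inStrTwo = true ∧ c = '"' then pvAGo rest inStrOne false
    else pvAGo rest inStrOne inStrTwo

def decideIfSetOrDic (string : String) : String :=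
  pvAGo string.toList false false

-- ===== PORT B =====
-- transliteration of B's cursor loop: on a quote, jump past the first matching quote
-- (string.find; none found = return "set"); on ':' return "dic"; else advance one char.
def pvBGo : List Char → String
  | [] => "set"
  | c :: rest =>
    if c = '\'' ∨ c = '"' then
      if h : c ∈ rest then pvBGo (rest.drop (rest.idxOf c + 1))
      else "set"
    else if c = ':' then "dic"
    else pvBGo rest
termination_by l => l.length
decreasing_by
  · simp only [List.length_drop, List.length_cons]
    have := List.idxOf_lt_length_of_mem h
    omega
  · simp

def decideIfSetOrDic_alt (string : String) : String :=
  pvBGo string.toList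

-- ===== PRECONDITION & SPEC =====
def Spec_decideIfSetOrDic (string : String) (out : String) : Prop := out = decideIfSetOrDic_alt string
instance (string : String) (out : String) : Decidable (Spec_decideIfSetOrDic string out) := by unfold Spec_decideIfSetOrDic; infer_instance

-- ===== CLAIM (what is proved, stated in full; the proofs are below) =====
def Claim_equal_decideIfSetOrDic : Prop := ∀ (string : String), Dom_decideIfSetOrDic string → Spec_decideIfSetOrDic string (decideIfSetOrDic string)

-- ===== LEMMAS AND PROOFS =====

-- While inside a single-quoted region, A ignores everything until the next single quote.
theorem pvAGo_inOne (l : List Char) :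
    pvAGo l true false =
      (if _h : '\'' ∈ l then pvAGo (l.drop (l.idxOf '\'' + 1)) false false else "set") := by
  induction l with
  | nil => simp [pvAGo]
  | cons c rest ih =>
    by_cases hc : c = '\''
    · subst hc
      simp [pvAGo, List.idxOf_cons_self]
    · have hmem : '\'' ∈ c :: rest ↔ '\'' ∈ rest := by
        rw [List.mem_cons]
        exact or_iff_right (fun h' => hc h'.symm)
      rw [show pvAGo (c :: rest) true false = pvAGo rest true false by
            simp [pvAGo, hc]]
      rw [ih]
      by_cases h : '\'' ∈ rest
      · simp only [h, hmem.mpr h, dif_pos]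
        rw [List.idxOf_cons_ne rest hc]
        simp
      · simp [h, hmem]

-- While inside a double-quoted region, A ignores everything until the next double quote.
theorem pvAGo_inTwo (l : List Char) :
    pvAGo l false true =
      (if _h : '"' ∈ l then pvAGo (l.drop (l.idxOf '"' + 1)) false false else "set") := by
  induction l with
  | nil => simp [pvAGo]
  | cons c rest ih =>
    by_cases hc : c = '"'
    · subst hc
      simp [pvAGo, List.idxOf_cons_self]
    · have hmem : '"' ∈ c :: rest ↔ '"' ∈ rest := by
        rw [List.mem_cons]
        exact or_iff_right (fun h' => hc h'.symm)
      rw [show pvAGo (c :: rest) false true = pvAGo rest false true by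
            simp [pvAGo, hc]]
      rw [ih]
      by_cases h : '"' ∈ rest
      · simp only [h, hmem.mpr h, dif_pos]
        rw [List.idxOf_cons_ne rest hc]
        simp
      · simp [h, hmem]

theorem pvAGo_eq_pvBGo : ∀ (n : Nat) (l : List Char), l.length ≤ n →
    pvAGo l false false = pvBGo l := by
  intro n
  induction n with
  | zero =>
    intro l hl
    have : l = [] := List.eq_nil_of_length_eq_zero (Nat.le_zero.mp hl)
    simp [this, pvAGo, pvBGo]
  | succ n ih =>
    intro l hl
    match l with
    | [] => simp [pvAGo, pvBGo]
    | c :: rest =>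
      simp only [List.length_cons, Nat.succ_le_succ_iff] at hl
      by_cases h1 : c = '\''
      · subst h1
        rw [show pvAGo ('\'' :: rest) false false = pvAGo rest true false by
              simp [pvAGo]]
        rw [pvAGo_inOne]
        rw [pvBGo]
        by_cases h : '\'' ∈ rest
        · simp only [h, dif_pos]
          exact ih _ (Nat.le_trans (by simp) hl)
        · simp [h]
      · by_cases h2 : c = '"'
        · subst h2
          rw [show pvAGo ('"' :: rest) false false = pvAGo rest false true by
                simp [pvAGo]]
          rw [pvAGo_inTwo]
          rw [pvBGo]
          by_cases h : '"' ∈ rest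
          · simp only [h, dif_pos]
            exact ih _ (Nat.le_trans (by simp) hl)
          · simp [h]
        · by_cases h3 : c = ':'
          · subst h3
            rw [pvBGo]
            simp [pvAGo]
          · rw [show pvAGo (c :: rest) false false = pvAGo rest false false by
                  simp [pvAGo, h1, h2, h3]]
            rw [pvBGo]
            rw [if_neg (by simp [h1, h2]), if_neg h3]
            exact ih _ hl

-- ===== VERDICT (by name: the statement is the Claim_ definition above) =====
theorem decideIfSetOrDic_spec : Claim_equal_decideIfSetOrDic := by
  intro s _
  unfold Spec_decideIfSetOrDic decideIfSetOrDic decideIfSetOrDic_alt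
  exact pvAGo_eq_pvBGo s.toList.length s.toList (Nat.le_refl _)
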